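-- pv_equiv track=rewrite | github.com/Firkraag/leptjson | leptjson.py | _parse_exp
-- ===== SOURCE A (Python) =====
-- NONNEGATIVE_INTEGERS_LIST = '0123456789'
--
-- class LeptJsonParseError(Exception):
--     def __init__(self, msg):
--         super(LeptJsonParseError, self).__init__(msg)
--         self.msg = msg
--
-- def _parse_exp(json_string, current_index, string_length):
--     if current_index >= string_length or (json_string[current_index] != 'e' and json_string[current_index] != 'E'):
--         return current_index
--     current_index += 1
--     if current_index >= string_length:
--         raise LeptJsonParseError("lept parse invalid value")
--     if json_string[current_index] == '-' or json_string[current_index] == '+':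
--         current_index += 1
--     if current_index >= string_length:
--         raise LeptJsonParseError("lept parse invalid value")
--     if current_index < string_length and json_string[current_index] in NONNEGATIVE_INTEGERS_LIST:
--         while current_index < string_length and json_string[current_index] in NONNEGATIVE_INTEGERS_LIST:
--             current_index += 1
--         return current_index
--     raise LeptJsonParseError("lept parse invalid value")
-- ===== SOURCE B (Python) =====
-- import re
--
-- NONNEGATIVE_INTEGERS_LIST = '0123456789'
--
-- class LeptJsonParseError(Exception):
--     def __init__(self, msg):
--         super(LeptJsonParseError, self).__init__(msg)
--         self.msg = msg
--
-- _EXP_PATTERN = re.compile(r'[eE][-+]?[0-9]+')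
--
-- def _parse_exp(json_string, current_index, string_length):
--     if current_index >= string_length or json_string[current_index] not in 'eE':
--         return current_index
--     m = _EXP_PATTERN.match(json_string, current_index, string_length)
--     if m is None:
--         raise LeptJsonParseError("lept parse invalid value")
--     return m.end()
-- ===== Notes on version B (the rewrite author's own statement) =====
-- stated objective: idiomatic
-- what changed: Replaces A's manual index stepping (guard, +1, optional sign, hand-written digit while-loop) with a single anchored compiled-regex match of [eE][-+]?[0-9]+ at (pos, endpos), returning match.end(); Pre_ additionally excludes negative current_index whose wrapped-around character is 'e'/'E', where A's returned index is a negative-index-wraparound artefact outside the parser's natural nonnegative-index domain.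
-- outside the precondition, e.g. on _parse_exp('e1', -2, 2): A returns 0, B returns 2; on _parse_exp('e1', -2, 1): A returns 0, B raises LeptJsonParseError
import Mathlib
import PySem

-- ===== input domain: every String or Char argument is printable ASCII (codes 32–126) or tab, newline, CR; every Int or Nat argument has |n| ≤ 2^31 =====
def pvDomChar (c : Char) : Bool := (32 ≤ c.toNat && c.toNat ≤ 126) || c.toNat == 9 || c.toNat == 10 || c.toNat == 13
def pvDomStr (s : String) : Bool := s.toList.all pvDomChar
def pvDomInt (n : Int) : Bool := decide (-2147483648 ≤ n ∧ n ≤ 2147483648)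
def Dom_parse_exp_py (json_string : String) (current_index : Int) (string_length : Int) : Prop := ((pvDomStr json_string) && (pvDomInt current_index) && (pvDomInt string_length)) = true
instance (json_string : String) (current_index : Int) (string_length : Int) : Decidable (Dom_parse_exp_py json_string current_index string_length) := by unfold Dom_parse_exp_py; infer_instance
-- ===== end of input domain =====

-- B replaces A's manual index stepping and hand-written digit while-loop by one anchored
-- regex-style match ([eE][-+]?[0-9]+, bounded by pos/endpos) returning the match end (idiomatic).

-- ===== PORT A =====
-- while current_index < string_length and json_string[current_index] in NONNEGATIVE_INTEGERS_LIST: current_index += 1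
-- fuel = (string_length - current_index).toNat is enough for the loop to run to its exit condition;
-- 0 marks the paths where the Python raises (IndexError); Pre_ excludes them.
def parse_exp_loop (s : String) (L : Int) : Nat → Int → Int
  | 0, i => i
  | fuel+1, i =>
    if i < L then
      match PySem.Str.pyGet? s i with
      | none => 0  -- IndexError
      | some c => if c.isDigit then parse_exp_loop s L fuel (i + 1) else i
    else i

def parse_exp_py (json_string : String) (current_index : Int) (string_length : Int) : Int :=
  if current_index ≥ string_length then current_index
  else
    match PySem.Str.pyGet? json_string current_index with
    | none => 0  -- IndexError
    | some c =>
      if c ≠ 'e' ∧ c ≠ 'E' then current_index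
      else
        let i1 := current_index + 1
        if i1 ≥ string_length then 0  -- raise LeptJsonParseError
        else
          match PySem.Str.pyGet? json_string i1 with
          | none => 0  -- IndexError
          | some c1 =>
            let i2 := if c1 = '-' ∨ c1 = '+' then i1 + 1 else i1
            if i2 ≥ string_length then 0  -- raise LeptJsonParseError
            else
              match PySem.Str.pyGet? json_string i2 with
              | none => 0  -- IndexError
              | some d =>
                if d.isDigit then parse_exp_loop json_string string_length (string_length - i2).toNat i2
                else 0  -- raise LeptJsonParseError

-- ===== PORT B =====
-- hand port of _EXP_PATTERN.match(json_string, pos, endpos) for the anchored pattern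
-- [eE][-+]?[0-9]+ : pos/endpos clamped into [0, len], greedy digit run via takeWhile;
-- exact for this pattern (no backtracking is possible: '+'/'-' is never a digit).
def matchExpEnd (json_string : String) (pos endp : Int) : Option Int :=
  let cs := json_string.toList
  let e : Nat := (min endp (cs.length : Int)).toNat
  let p : Nat := pos.toNat
  if p < e then
    match cs[p]? with
    | none => none
    | some c =>
      if c = 'e' ∨ c = 'E' then
        let q : Nat :=
          if decide (p + 1 < e) && (cs[p+1]?.any fun c1 => c1 == '-' || c1 == '+')
          then p + 2 else p + 1
        let ds := ((cs.drop q).take (e - q)).takeWhile Char.isDigit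
        if ds.length = 0 then none else some ((q + ds.length : Nat) : Int)
      else none
  else none

def parse_exp_py_alt (json_string : String) (current_index : Int) (string_length : Int) : Int :=
  if current_index ≥ string_length then current_index
  else
    match PySem.Str.pyGet? json_string current_index with
    | none => 0  -- IndexError in the guard
    | some c =>
      if c = 'e' ∨ c = 'E' then
        match matchExpEnd json_string current_index string_length with
        | none => 0  -- raise LeptJsonParseError
        | some r => r
      else current_index

-- ===== PRECONDITION & SPEC =====
-- Pre_ holds exactly where the Python A returns normally (no LeptJsonParseError, no IndexError),
-- except that it also excludes negative current_index whose wrapped-around character is 'e'/'E':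
-- there A's returned index is a negative-index-wraparound artefact outside the parser's natural
-- (nonnegative-index) domain, and B matches the exponent at the unwrapped position instead.
def pvPreCheck (json_string : String) (current_index : Int) (string_length : Int) : Bool :=
  if string_length ≤ current_index then true
  else
    match PySem.Str.pyGet? json_string current_index with
    | none => false
    | some c =>
      if c = 'e' ∨ c = 'E' then
        if current_index < 0 then false
        else
          match PySem.Str.pyGet? json_string (current_index + 1) with
          | none => false
          | some c1 =>
            let j : Int := if c1 = '-' ∨ c1 = '+' then current_index + 2 else current_index + 1
            if string_length ≤ j then false
            else
              match PySem.Str.pyGet? json_string j with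
              | none => false
              | some d =>
                d.isDigit &&
                  (let r : Int := j + (((json_string.toList.drop j.toNat).takeWhile Char.isDigit).length : Int)
                   decide (string_length ≤ r ∨ r < (json_string.toList.length : Int)))
      else true

def Pre_parse_exp_py (json_string : String) (current_index : Int) (string_length : Int) : Prop :=
  pvPreCheck json_string current_index string_length = true
instance (json_string : String) (current_index : Int) (string_length : Int) : Decidable (Pre_parse_exp_py json_string current_index string_length) := by unfold Pre_parse_exp_py; infer_instance

def pvWitness_parse_exp_py : String × Int × Int := ("1e-05", 1, 5)

def Spec_parse_exp_py (json_string : String) (current_index : Int) (string_length : Int) (out : Int) : Prop := out = parse_exp_py_alt json_string current_index string_length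
instance (json_string : String) (current_index : Int) (string_length : Int) (out : Int) : Decidable (Spec_parse_exp_py json_string current_index string_length out) := by unfold Spec_parse_exp_py; infer_instance

-- ===== CLAIM (what is proved, stated in full; the proofs are below) =====
def Claim_equal_parse_exp_py : Prop := ∀ (json_string : String) (current_index : Int) (string_length : Int), Dom_parse_exp_py json_string current_index string_length → Pre_parse_exp_py json_string current_index string_length → Spec_parse_exp_py json_string current_index string_length (parse_exp_py json_string current_index string_length)

-- ===== LEMMAS AND PROOFS =====

def pvDigitRun (cs : List Char) (j : Nat) : Nat := ((cs.drop j).takeWhile Char.isDigit).length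

lemma pvDigitRun_le (cs : List Char) (j : Nat) : pvDigitRun cs j ≤ cs.length - j := by
  calc pvDigitRun cs j ≤ (cs.drop j).length := (List.takeWhile_sublist _).length_le
    _ = cs.length - j := by simp

lemma pvDigitRun_succ (cs : List Char) (j : Nat) (h : j < cs.length) (hd : cs[j].isDigit = true) :
    pvDigitRun cs j = pvDigitRun cs (j+1) + 1 := by
  unfold pvDigitRun
  rw [List.drop_eq_getElem_cons h, List.takeWhile_cons, hd]
  simp

lemma pvDigitRun_zero (cs : List Char) (j : Nat) (h : j < cs.length) (hd : cs[j].isDigit = false) :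
    pvDigitRun cs j = 0 := by
  unfold pvDigitRun
  rw [List.drop_eq_getElem_cons h, List.takeWhile_cons, hd]
  simp

lemma parse_exp_loop_spec (s : String) (L : Int) :
    ∀ (fuel : Nat) (j : Nat), (j : Int) ≤ L → (L - (j : Int)).toNat ≤ fuel →
    (L ≤ (j : Int) + (pvDigitRun s.toList j : Int) ∨
      (j : Int) + (pvDigitRun s.toList j : Int) < (s.toList.length : Int)) →
    parse_exp_loop s L fuel (j : Int) =
      min ((j : Int) + (pvDigitRun s.toList j : Int)) L := by
  intro fuel
  induction fuel with
  | zero =>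
    intro j hjL hf _
    have : L = (j : Int) := by omega
    simp [parse_exp_loop, this]
  | succ fuel ih =>
    intro j hjL hf hside
    rw [parse_exp_loop]
    by_cases hlt : (j : Int) < L
    · simp only [hlt, if_true]
      rw [PySem.Str.pyGet?_natCast]
      by_cases hjn : j < s.toList.length
      · rw [List.getElem?_eq_getElem hjn]
        by_cases hd : (s.toList[j]).isDigit = true
        · simp only [hd, if_true]
          have hrec := ih (j+1) (by push_cast; omega) (by omega)
            (by rw [pvDigitRun_succ s.toList j hjn hd] at hside; push_cast at hside ⊢; omega)
          push_cast at hrec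
          rw [hrec, pvDigitRun_succ s.toList j hjn hd]
          push_cast
          omega
        · simp only [hd]
          rw [pvDigitRun_zero s.toList j hjn (by simpa using hd)]
          simp
          omega
      · exfalso
        have h0 : pvDigitRun s.toList j = 0 := by
          unfold pvDigitRun
          rw [List.drop_eq_nil_of_le (by omega)]
          simp
        rw [h0] at hside
        omega
    · have : L = (j : Int) := by omega
      simp [this]

lemma matchExpEnd_spec (s : String) (i L : Int) (j : Nat)
    (hi : 0 ≤ i) (hiL : i < L)
    (hc : ∃ c, s.toList[i.toNat]? = some c ∧ (c = 'e' ∨ c = 'E'))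
    (hc1 : ∃ c1, s.toList[i.toNat + 1]? = some c1 ∧
        ((c1 = '-' ∨ c1 = '+') → j = i.toNat + 2) ∧ (¬(c1 = '-' ∨ c1 = '+') → j = i.toNat + 1))
    (hjL : (j : Int) < L)
    (hd : ∃ d, s.toList[j]? = some d ∧ d.isDigit = true)
    :
    matchExpEnd s i L = some (min ((j : Int) + (pvDigitRun s.toList j : Int)) L) := by
  obtain ⟨c, hg, hce⟩ := hc
  obtain ⟨c1, hg1, hsgn1, hsgn2⟩ := hc1
  obtain ⟨d, hgj, hdig⟩ := hd
  unfold matchExpEnd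
  have hn1 : i.toNat < s.toList.length := (List.getElem?_eq_some_iff.mp hg).1
  have hn2 : i.toNat + 1 < s.toList.length := (List.getElem?_eq_some_iff.mp hg1).1
  have hnj : j < s.toList.length := (List.getElem?_eq_some_iff.mp hgj).1
  have hji : i.toNat + 1 ≤ j := by
    by_cases hs : c1 = '-' ∨ c1 = '+'
    · have := hsgn1 hs; omega
    · have := hsgn2 hs; omega
  have he : (min L (s.toList.length : Int)).toNat = min L.toNat s.toList.length := by omega
  have hpe : i.toNat < (min L (s.toList.length : Int)).toNat := by omega
  rw [if_pos hpe]
  simp only [hg, if_pos hce]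
  have hq : (if decide (i.toNat + 1 < (min L (s.toList.length : Int)).toNat) &&
      (s.toList[i.toNat+1]?.any fun c1 => c1 == '-' || c1 == '+') then i.toNat + 2 else i.toNat + 1) = j := by
    rw [hg1]
    by_cases hs : c1 = '-' ∨ c1 = '+'
    · have hj2 : j = i.toNat + 2 := hsgn1 hs
      have : i.toNat + 1 < (min L (s.toList.length : Int)).toNat := by omega
      simp only [Option.any_some, this, decide_true, Bool.true_and]
      rcases hs with h | h <;> simp [h, hj2]
    · have hj1 : j = i.toNat + 1 := hsgn2 hs
      push_neg at hs
      simp [hs.1, hs.2, hj1]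
  rw [hq, he]
  have hrun1 : 1 ≤ pvDigitRun s.toList j := by
    rw [pvDigitRun_succ s.toList j hnj (by rw [List.getElem?_eq_getElem hnj] at hgj; simp at hgj; rw [hgj]; exact hdig)]
    omega
  have hrun_le : pvDigitRun s.toList j ≤ s.toList.length - j := pvDigitRun_le _ _
  have hds : (((s.toList.drop j).take (min L.toNat s.toList.length - j)).takeWhile Char.isDigit).length
      = min (min L.toNat s.toList.length - j) (pvDigitRun s.toList j) := by
    rw [← List.take_takeWhile]
    rw [List.length_take]
    rfl
  rw [hds]
  have hlen : ¬ (min (min L.toNat s.toList.length - j) (pvDigitRun s.toList j) = 0) := by omega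
  rw [if_neg hlen]
  congr 1
  omega

lemma chars_list_pyGet (cs : List Char) (i : Int) : PySem.Chars.pyGet? cs i = PySem.List.pyGet? cs i := rfl

lemma main_core (s : String) (i L : Int) (c c1 d : Char) (jN : Nat)
    (hi0 : 0 ≤ i) (hiL' : i < L)
    (hg : PySem.Chars.pyGet? s.toList i = some c) (hc : c = 'e' ∨ c = 'E')
    (hg1 : PySem.Chars.pyGet? s.toList (i + 1) = some c1)
    (hsgn1 : (c1 = '-' ∨ c1 = '+') → (jN : Int) = i + 2)
    (hsgn2 : ¬(c1 = '-' ∨ c1 = '+') → (jN : Int) = i + 1)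
    (hjL : (jN : Int) < L)
    (hgj : PySem.Chars.pyGet? s.toList ((jN : Nat) : Int) = some d)
    (hd : d.isDigit = true)
    (hside : L ≤ ((jN : Nat) : Int) + (pvDigitRun s.toList jN : Int) ∨
      ((jN : Nat) : Int) + (pvDigitRun s.toList jN : Int) < (s.toList.length : Int)) :
    parse_exp_py s i L = parse_exp_py_alt s i L := by
  have hg' : s.toList[i.toNat]? = some c := by
    rw [chars_list_pyGet, show i = ((i.toNat : Nat) : Int) from by omega] at hg
    rwa [PySem.List.pyGet?_natCast] at hg
  have hg1' : s.toList[i.toNat + 1]? = some c1 := by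
    rw [chars_list_pyGet, show i + 1 = ((i.toNat + 1 : Nat) : Int) from by omega] at hg1
    rwa [PySem.List.pyGet?_natCast] at hg1
  have hgj' : s.toList[jN]? = some d := by
    rw [chars_list_pyGet] at hgj
    rwa [PySem.List.pyGet?_natCast] at hgj
  have hif : (if c1 = '-' ∨ c1 = '+' then i + 1 + 1 else i + 1) = ((jN : Nat) : Int) := by
    by_cases h : c1 = '-' ∨ c1 = '+'
    · rw [if_pos h]; have := hsgn1 h; omega
    · rw [if_neg h]; have := hsgn2 h; omega
  have hloop := parse_exp_loop_spec s L ((L - ((jN : Nat) : Int)).toNat) jN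
    (by omega) (by omega) hside
  have hA : parse_exp_py s i L
      = min (((jN : Nat) : Int) + (pvDigitRun s.toList jN : Int)) L := by
    unfold parse_exp_py
    rw [if_neg (show ¬ (i ≥ L) from by omega)]
    simp only [PySem.Str.pyGet?, hg]
    rw [if_neg (show ¬ (c ≠ 'e' ∧ c ≠ 'E') from by tauto)]
    rw [if_neg (show ¬ (i + 1 ≥ L) from by omega)]
    simp only [hg1, hif]
    rw [if_neg (show ¬ (((jN : Nat) : Int) ≥ L) from by omega)]
    simp only [hgj]
    rw [if_pos hd]
    exact hloop
  have hB : parse_exp_py_alt s i L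
      = min (((jN : Nat) : Int) + (pvDigitRun s.toList jN : Int)) L := by
    unfold parse_exp_py_alt
    rw [if_neg (show ¬ (i ≥ L) from by omega)]
    simp only [PySem.Str.pyGet?, hg]
    rw [if_pos hc]
    have hm := matchExpEnd_spec s i L jN hi0 hiL'
      ⟨c, hg', hc⟩
      ⟨c1, hg1',
        fun h => by have := hsgn1 h; omega,
        fun h => by have := hsgn2 h; omega⟩
      hjL
      ⟨d, hgj', hd⟩
    rw [hm]
  rw [hA, hB]

lemma parse_exp_py_eq_alt : ∀ (s : String) (i L : Int), Pre_parse_exp_py s i L →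
    parse_exp_py s i L = parse_exp_py_alt s i L := by
  intro s i L hpre
  unfold Pre_parse_exp_py pvPreCheck at hpre
  simp only [PySem.Str.pyGet?] at hpre
  by_cases hiL : L ≤ i
  · simp [parse_exp_py, parse_exp_py_alt, hiL]
  · rw [if_neg hiL] at hpre
    have hiL' : i < L := by omega
    cases hg : PySem.Chars.pyGet? s.toList i with
    | none => simp only [hg] at hpre; exact absurd hpre (by simp)
    | some c =>
      simp only [hg] at hpre
      by_cases hc : c = 'e' ∨ c = 'E'
      · rw [if_pos hc] at hpre
        by_cases hneg : i < 0
        · rw [if_pos hneg] at hpre; exact absurd hpre (by simp)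
        · rw [if_neg hneg] at hpre
          have hi0 : 0 ≤ i := by omega
          cases hg1 : PySem.Chars.pyGet? s.toList (i + 1) with
          | none => simp only [hg1] at hpre; exact absurd hpre (by simp)
          | some c1 =>
            simp only [hg1] at hpre
            by_cases hsgn : c1 = '-' ∨ c1 = '+'
            · rw [if_pos hsgn] at hpre
              by_cases hjL : L ≤ (i + 2 : Int)
              · rw [if_pos hjL] at hpre; exact absurd hpre (by simp)
              · rw [if_neg hjL] at hpre
                cases hgj : PySem.Chars.pyGet? s.toList (i + 2 : Int) with
                | none => simp only [hgj] at hpre; exact absurd hpre (by simp)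
                | some d =>
                  simp only [hgj, Bool.and_eq_true, decide_eq_true_eq] at hpre
                  obtain ⟨hd, hside⟩ := hpre
                  rw [show ((List.takeWhile Char.isDigit (List.drop (i + 2 : Int).toNat s.toList)).length)
                      = pvDigitRun s.toList (i + 2 : Int).toNat from rfl] at hside
                  refine main_core s i L c c1 d (i + 2 : Int).toNat hi0 hiL' hg hc hg1
                    (fun _ => by omega) (fun h => absurd hsgn h) (by omega) ?_ hd (by omega)
                  rw [show (((i + 2 : Int).toNat : Nat) : Int) = (i + 2 : Int) from by omega]
                  exact hgj
            · rw [if_neg hsgn] at hpre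
              by_cases hjL : L ≤ (i + 1 : Int)
              · rw [if_pos hjL] at hpre; exact absurd hpre (by simp)
              · rw [if_neg hjL] at hpre
                cases hgj : PySem.Chars.pyGet? s.toList (i + 1 : Int) with
                | none => simp only [hgj] at hpre; exact absurd hpre (by simp)
                | some d =>
                  simp only [hgj, Bool.and_eq_true, decide_eq_true_eq] at hpre
                  obtain ⟨hd, hside⟩ := hpre
                  rw [show ((List.takeWhile Char.isDigit (List.drop (i + 1 : Int).toNat s.toList)).length)
                      = pvDigitRun s.toList (i + 1 : Int).toNat from rfl] at hside
                  refine main_core s i L c c1 d (i + 1 : Int).toNat hi0 hiL' hg hc hg1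
                    (fun h => absurd h hsgn) (fun _ => by omega) (by omega) ?_ hd (by omega)
                  rw [show (((i + 1 : Int).toNat : Nat) : Int) = (i + 1 : Int) from by omega]
                  exact hgj
      · rw [if_neg hc] at hpre
        have hc' : c ≠ 'e' ∧ c ≠ 'E' := by tauto
        have hgl : PySem.List.pyGet? s.toList i = some c := hg
        simp [parse_exp_py, parse_exp_py_alt, PySem.Str.pyGet?, hgl, hc'.1, hc'.2,
          show ¬ (i ≥ L) from by omega]

-- ===== VERDICT (by name: the statement is the Claim_ definition above) =====
theorem parse_exp_py_spec : Claim_equal_parse_exp_py := by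
  intro json_string current_index string_length _ hpre
  unfold Spec_parse_exp_py
  exact parse_exp_py_eq_alt json_string current_index string_length hpre
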